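-- pv_equiv track=rewrite | github.com/pypi-data/pypi-mirror-401 | packages/mapify-cli/mapify_cli-2.3.0-py3-none-any.whl/mapify_cli/__init__.py | create_predictor_content
-- ===== SOURCE A (Python) =====
-- from typing import Optional, List, Dict, Any
--
-- def create_predictor_content(mcp_servers: List[str]) -> str:
--     """Create predictor agent content"""
--     mcp_section = ""
--     if any(s in mcp_servers for s in ["cipher", "deepwiki", "context7"]):
--         mcp_section = """
-- ## MCP Integration
--
-- **ALWAYS use these MCP tools:**
-- """
--         if "cipher" in mcp_servers:
--             mcp_section += """
-- 1. **mcp__cipher__cipher_memory_search** - Find similar impact patterns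
--    - Query: "impact analysis [change_type]"
--    - Learn from past breaking changes
-- """
--         if "deepwiki" in mcp_servers:
--             mcp_section += """
-- 2. **mcp__deepwiki__ask_question** - Check how repos handle similar changes
--    - Ask: "What breaks when changing [component]?"
-- """
--         if "context7" in mcp_servers:
--             mcp_section += """
-- 3. **mcp__context7__get-library-docs** - Check library compatibility
--    - Verify API changes against current documentation
-- """
--
--     return f"""---
-- name: predictor
-- description: Predicts consequences and dependency impact of changes (MAP)
-- tools: Read, Grep, Glob, Bash
-- model: sonnet
-- ---
--
-- # Role: Impact Analysis Specialist (MAP)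
--
-- You analyze proposed changes to predict their effects across the codebase.
-- {mcp_section}
-- ## Analysis Process
--
-- 1. Read the proposed code changes
-- 2. Identify directly modified files and APIs
-- 3. Trace dependencies using Grep/Glob
-- 4. Predict the resulting state and risks
--
-- ## Output Format (JSON only)
--
-- Return JSON with predicted state, affected components, breaking changes, and risk assessment.
-- """
-- ===== SOURCE B (Python) =====
-- from typing import List
--
-- _MCP_HEADER = """
-- ## MCP Integration
--
-- **ALWAYS use these MCP tools:**
-- """
--
-- _BLOCKS = ["""
-- 1. **mcp__cipher__cipher_memory_search** - Find similar impact patterns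
--    - Query: "impact analysis [change_type]"
--    - Learn from past breaking changes
-- """, """
-- 2. **mcp__deepwiki__ask_question** - Check how repos handle similar changes
--    - Ask: "What breaks when changing [component]?"
-- """, """
-- 3. **mcp__context7__get-library-docs** - Check library compatibility
--    - Verify API changes against current documentation
-- """]
--
--
-- def _build_sections():
--     # Precompute the MCP section for every subset of the three servers,
--     # indexed by bitmask (bit 0 = cipher, bit 1 = deepwiki, bit 2 = context7).
--     sections = []
--     for mask in range(8):
--         if mask == 0:
--             sections.append("")
--         else:
--             s = _MCP_HEADER
--             for i, block in enumerate(_BLOCKS):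
--                 if (mask >> i) & 1:
--                     s += block
--             sections.append(s)
--     return sections
--
--
-- _SECTIONS = _build_sections()
--
--
-- def create_predictor_content(mcp_servers: List[str]) -> str:
--     """Create predictor agent content"""
--     c = d = x = False
--     for s in mcp_servers:
--         c = c or s == "cipher"
--         d = d or s == "deepwiki"
--         x = x or s == "context7"
--     mcp_section = _SECTIONS[(4 if x else 0) + (2 if d else 0) + (1 if c else 0)]
--     return f"""---
-- name: predictor
-- description: Predicts consequences and dependency impact of changes (MAP)
-- tools: Read, Grep, Glob, Bash
-- model: sonnet
-- ---
--
-- # Role: Impact Analysis Specialist (MAP)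
--
-- You analyze proposed changes to predict their effects across the codebase.
-- {mcp_section}
-- ## Analysis Process
--
-- 1. Read the proposed code changes
-- 2. Identify directly modified files and APIs
-- 3. Trace dependencies using Grep/Glob
-- 4. Predict the resulting state and risks
--
-- ## Output Format (JSON only)
--
-- Return JSON with predicted state, affected components, breaking changes, and risk assessment.
-- """
-- ===== Notes on version B (the rewrite author's own statement) =====
-- stated objective: alternative
-- what changed: A scans mcp_servers repeatedly (an any() guard plus three 'in' membership tests) and concatenates conditionally; B makes ONE pass over mcp_servers accumulating three boolean flags, packs them into a bitmask and looks the whole MCP section up in a table of all 8 precomputed sections, so no membership test or conditional concatenation happens at call time.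
import Mathlib
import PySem

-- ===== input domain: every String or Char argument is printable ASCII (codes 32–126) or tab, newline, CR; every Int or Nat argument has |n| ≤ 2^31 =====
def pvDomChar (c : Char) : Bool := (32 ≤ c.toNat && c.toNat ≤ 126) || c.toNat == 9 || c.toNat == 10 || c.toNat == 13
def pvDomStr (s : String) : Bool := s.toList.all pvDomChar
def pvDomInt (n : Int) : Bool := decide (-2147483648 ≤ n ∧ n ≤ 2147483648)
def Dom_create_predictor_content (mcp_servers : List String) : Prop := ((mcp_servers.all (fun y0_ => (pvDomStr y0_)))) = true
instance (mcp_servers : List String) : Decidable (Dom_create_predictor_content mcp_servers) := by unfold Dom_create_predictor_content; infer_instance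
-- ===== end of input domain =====

-- B replaces A's repeated membership scans and conditional appends by one pass over the input
-- accumulating three flags, then a lookup in a precomputed table of all 8 possible MCP sections.

-- ===== PORT A =====
-- A-side string constants (the literal blocks A appends)
def pvHeaderA : String := "\n## MCP Integration\n\n**ALWAYS use these MCP tools:**\n"
def pvCipherA : String := "\n1. **mcp__cipher__cipher_memory_search** - Find similar impact patterns\n   - Query: \"impact analysis [change_type]\"\n   - Learn from past breaking changes\n"
def pvDeepwikiA : String := "\n2. **mcp__deepwiki__ask_question** - Check how repos handle similar changes\n   - Ask: \"What breaks when changing [component]?\"\n"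
def pvContext7A : String := "\n3. **mcp__context7__get-library-docs** - Check library compatibility\n   - Verify API changes against current documentation\n"
def pvTemplatePre : String := "---\nname: predictor\ndescription: Predicts consequences and dependency impact of changes (MAP)\ntools: Read, Grep, Glob, Bash\nmodel: sonnet\n---\n\n# Role: Impact Analysis Specialist (MAP)\n\nYou analyze proposed changes to predict their effects across the codebase.\n"
def pvTemplatePost : String := "\n## Analysis Process\n\n1. Read the proposed code changes\n2. Identify directly modified files and APIs\n3. Trace dependencies using Grep/Glob\n4. Predict the resulting state and risks\n\n## Output Format (JSON only)\n\nReturn JSON with predicted state, affected components, breaking changes, and risk assessment.\n"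

def create_predictor_content (mcp_servers : List String) : String :=
  let mcp_section := ""
  let mcp_section :=
    if ["cipher", "deepwiki", "context7"].any (fun s => mcp_servers.contains s) then
      let m := pvHeaderA
      let m := if mcp_servers.contains "cipher" then m ++ pvCipherA else m
      let m := if mcp_servers.contains "deepwiki" then m ++ pvDeepwikiA else m
      let m := if mcp_servers.contains "context7" then m ++ pvContext7A else m
      m
    else mcp_section
  pvTemplatePre ++ mcp_section ++ pvTemplatePost

-- ===== PORT B =====
def pvBlocksB : List String := [pvCipherA, pvDeepwikiA, pvContext7A]

-- _build_sections: loop over range(8); 'range(8)' and '(mask >> i) & 1' act on non-negative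
-- ints only, so the Nat-level List.range / >>> / &&& are exact here.
def pvSectionsB : List String :=
  (List.range 8).foldl (fun sections mask =>
    if mask == 0 then sections ++ [""]
    else sections ++
      [pvBlocksB.zipIdx.foldl
        (fun s p => if (mask >>> p.2) &&& 1 == 1 then s ++ p.1 else s) pvHeaderA]) []

def create_predictor_content_alt (mcp_servers : List String) : String :=
  let f := mcp_servers.foldl
    (fun (t : Bool × Bool × Bool) s =>
      (t.1 || s == "cipher", t.2.1 || s == "deepwiki", t.2.2 || s == "context7"))
    (false, false, false)
  -- _SECTIONS[idx]: the index is always in [0,8), so getD is exact (no IndexError possible)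
  let mcp_section := pvSectionsB.getD
    ((if f.2.2 then 4 else 0) + (if f.2.1 then 2 else 0) + (if f.1 then 1 else 0)) ""
  pvTemplatePre ++ mcp_section ++ pvTemplatePost

-- ===== PRECONDITION & SPEC =====
def Spec_create_predictor_content (mcp_servers : List String) (out : String) : Prop := out = create_predictor_content_alt mcp_servers
instance (mcp_servers : List String) (out : String) : Decidable (Spec_create_predictor_content mcp_servers out) := by unfold Spec_create_predictor_content; infer_instance

-- ===== CLAIM (what is proved, stated in full; the proofs are below) =====
def Claim_equal_create_predictor_content : Prop := ∀ (mcp_servers : List String), Dom_create_predictor_content mcp_servers → Spec_create_predictor_content mcp_servers (create_predictor_content mcp_servers)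

-- ===== LEMMAS AND PROOFS =====

-- the one-pass flag fold computes exactly the three membership tests
theorem pv_flags_fold (l : List String) (a b c : Bool) :
    l.foldl (fun (t : Bool × Bool × Bool) s =>
      (t.1 || s == "cipher", t.2.1 || s == "deepwiki", t.2.2 || s == "context7")) (a, b, c)
    = (a || l.contains "cipher", b || l.contains "deepwiki", c || l.contains "context7") := by
  induction l generalizing a b c with
  | nil => simp
  | cons h t ih =>
      rw [List.foldl_cons, ih]
      simp [beq_eq_decide, eq_comm, Bool.or_assoc]

-- ===== VERDICT (by name: the statement is the Claim_ definition above) =====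
theorem create_predictor_content_spec : Claim_equal_create_predictor_content := by
  intro mcp_servers _
  unfold Spec_create_predictor_content create_predictor_content create_predictor_content_alt
  simp only [pv_flags_fold, Bool.false_or]
  by_cases h1 : "cipher" ∈ mcp_servers <;>
    by_cases h2 : "deepwiki" ∈ mcp_servers <;>
      by_cases h3 : "context7" ∈ mcp_servers <;>
        simp [h1, h2, h3, pvSectionsB, pvBlocksB, List.range, List.range.loop,
          List.zipIdx, List.getD, String.append_assoc]
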